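-- pv_equiv track=rewrite | github.com/titofonseca/predictiveAnalytics__Predictive_Vision_FlaskApp | main.py | get_display_name_for_metric
-- ===== SOURCE A (Python) =====
-- METRIC_MAP_GA4 = {
--     'Revenue': 'totalRevenue',
--     'Sessions': 'sessions',
--     'Conversions': 'ecommercePurchases'
-- }
--
-- METRIC_MAP_UA = {
--     'Revenue': 'ga:transactionRevenue',
--     'Sessions': 'ga:sessions',
--     'Conversions': 'ga:transactions'
-- }
--
-- def get_display_name_for_metric(metric):
--     for display_name, tech_name in METRIC_MAP_GA4.items():
--         if tech_name == metric:
--             return display_name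
--     for display_name, tech_name in METRIC_MAP_UA.items():
--         if tech_name == metric:
--             return display_name
--     return "Metric"
-- ===== SOURCE B (Python) =====
-- METRIC_MAP_GA4 = {
--     'Revenue': 'totalRevenue',
--     'Sessions': 'sessions',
--     'Conversions': 'ecommercePurchases'
-- }
--
-- METRIC_MAP_UA = {
--     'Revenue': 'ga:transactionRevenue',
--     'Sessions': 'ga:sessions',
--     'Conversions': 'ga:transactions'
-- }
--
-- def get_display_name_for_metric(metric):
--     # Decision chain grouped by display name: each branch tests the two
--     # technical spellings (GA4, UA) of one metric; no table is scanned at all.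
--     if metric == 'totalRevenue' or metric == 'ga:transactionRevenue':
--         return 'Revenue'
--     if metric == 'sessions' or metric == 'ga:sessions':
--         return 'Sessions'
--     if metric == 'ecommercePurchases' or metric == 'ga:transactions':
--         return 'Conversions'
--     return 'Metric'
-- ===== Notes on version B (the rewrite author's own statement) =====
-- stated objective: simpler
-- what changed: Replaced the two reverse scans over the forward dicts with a direct early-return decision chain grouped by display name (one branch per result, testing its GA4 and UA spellings), eliminating the dict data structure entirely.
import Mathlib
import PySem

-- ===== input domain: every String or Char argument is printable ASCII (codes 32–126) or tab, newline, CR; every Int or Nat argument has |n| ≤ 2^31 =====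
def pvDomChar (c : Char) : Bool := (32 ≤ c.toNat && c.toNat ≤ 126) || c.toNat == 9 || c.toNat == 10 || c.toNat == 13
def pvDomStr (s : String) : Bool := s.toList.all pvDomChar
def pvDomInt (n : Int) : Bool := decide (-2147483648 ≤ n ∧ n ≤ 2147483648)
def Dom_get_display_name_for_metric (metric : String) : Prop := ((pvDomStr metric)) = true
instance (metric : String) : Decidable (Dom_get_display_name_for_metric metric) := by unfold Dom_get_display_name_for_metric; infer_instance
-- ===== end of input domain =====

-- B replaces A's two reverse scans over the dicts with a direct early-return decision chain grouped by display name (simpler; no table).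

-- ===== PORT A =====
def METRIC_MAP_GA4 : List (String × String) :=
  [("Revenue", "totalRevenue"), ("Sessions", "sessions"), ("Conversions", "ecommercePurchases")]

def METRIC_MAP_UA : List (String × String) :=
  [("Revenue", "ga:transactionRevenue"), ("Sessions", "ga:sessions"), ("Conversions", "ga:transactions")]

-- 'for display_name, tech_name in d.items(): if tech_name == metric: return display_name'
def pvScanA (metric : String) : List (String × String) → Option String
  | [] => none
  | (display_name, tech_name) :: rest =>
      if tech_name == metric then some display_name else pvScanA metric rest

def get_display_name_for_metric (metric : String) : String :=
  match pvScanA metric METRIC_MAP_GA4 with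
  | some d => d
  | none =>
    match pvScanA metric METRIC_MAP_UA with
    | some d => d
    | none => "Metric"

-- ===== PORT B =====
def get_display_name_for_metric_alt (metric : String) : String :=
  if metric == "totalRevenue" || metric == "ga:transactionRevenue" then "Revenue"
  else if metric == "sessions" || metric == "ga:sessions" then "Sessions"
  else if metric == "ecommercePurchases" || metric == "ga:transactions" then "Conversions"
  else "Metric"

-- ===== PRECONDITION & SPEC =====
def Spec_get_display_name_for_metric (metric : String) (out : String) : Prop := out = get_display_name_for_metric_alt metric
instance (metric : String) (out : String) : Decidable (Spec_get_display_name_for_metric metric out) := by unfold Spec_get_display_name_for_metric; infer_instance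

-- ===== CLAIM (what is proved, stated in full; the proofs are below) =====
def Claim_equal_get_display_name_for_metric : Prop := ∀ (metric : String), Dom_get_display_name_for_metric metric → Spec_get_display_name_for_metric metric (get_display_name_for_metric metric)

-- ===== LEMMAS AND PROOFS =====

-- ===== VERDICT (by name: the statement is the Claim_ definition above) =====
theorem get_display_name_for_metric_spec : Claim_equal_get_display_name_for_metric := by
  intro metric _
  unfold Spec_get_display_name_for_metric
  by_cases h1 : metric = "totalRevenue"
  · subst h1; decide
  by_cases h2 : metric = "ga:transactionRevenue"
  · subst h2; decide
  by_cases h3 : metric = "sessions"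
  · subst h3; decide
  by_cases h4 : metric = "ga:sessions"
  · subst h4; decide
  by_cases h5 : metric = "ecommercePurchases"
  · subst h5; decide
  by_cases h6 : metric = "ga:transactions"
  · subst h6; decide
  simp [get_display_name_for_metric, get_display_name_for_metric_alt, pvScanA,
    METRIC_MAP_GA4, METRIC_MAP_UA,
    Ne.symm h1, Ne.symm h2, Ne.symm h3, Ne.symm h4, Ne.symm h5, Ne.symm h6,
    h1, h2, h3, h4, h5, h6]
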